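-- pv_equiv track=rewrite | github.com/tomasvanagas/prime-research | experiments/circuit_complexity/min_circuit_size.py | sensitivity_on_0
-- ===== SOURCE A (Python) =====
-- def sensitivity_on_0(tt, N):
--     """Sensitivity restricted to inputs where f=0."""
--     n = 2**N
--     max_s = 0
--     for x in range(n):
--         if tt[x] == 1:
--             continue
--         s = 0
--         for bit in range(N):
--             if tt[x ^ (1 << bit)] != tt[x]:
--                 s += 1
--         max_s = max(max_s, s)
--     return max_s
-- ===== SOURCE B (Python) =====
-- def sensitivity_on_0(tt, N):
--     """Sensitivity restricted to inputs where f=0.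
--
--     Edge-scatter: visit every hypercube edge once (from its smaller
--     endpoint), incrementing a per-vertex sensitivity table on a
--     difference, then take the max over the zero-vertices.
--     """
--     n = 2 ** N
--     sens = [0] * n
--     for x in range(n):
--         for bit in range(N):
--             y = x ^ (1 << bit)
--             if x < y and tt[x] != tt[y]:
--                 sens[x] += 1
--                 sens[y] += 1
--     best = 0
--     for x in range(n):
--         if tt[x] != 1:
--             best = max(best, sens[x])
--     return best
-- ===== Notes on version B (the rewrite author's own statement) =====
-- stated objective: alternative
-- what changed: Replaces A's per-vertex gather (re-scanning all N neighbours of each zero-vertex) by a single edge-scatter pass that visits each hypercube edge once from its smaller endpoint and maintains a per-vertex sensitivity table, followed by a filtered max pass over the table.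
import Mathlib
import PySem

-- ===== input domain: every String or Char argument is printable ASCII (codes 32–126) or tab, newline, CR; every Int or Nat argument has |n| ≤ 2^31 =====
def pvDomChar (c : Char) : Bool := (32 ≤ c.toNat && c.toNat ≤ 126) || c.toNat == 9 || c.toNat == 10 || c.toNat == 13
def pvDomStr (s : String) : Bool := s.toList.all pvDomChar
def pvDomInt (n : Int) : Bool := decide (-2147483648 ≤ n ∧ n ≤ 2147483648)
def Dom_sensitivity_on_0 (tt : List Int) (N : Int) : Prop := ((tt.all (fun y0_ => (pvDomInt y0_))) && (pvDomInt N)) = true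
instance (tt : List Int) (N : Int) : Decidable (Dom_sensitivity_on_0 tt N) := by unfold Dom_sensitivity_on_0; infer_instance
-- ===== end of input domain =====

-- B replaces A's per-vertex gather of neighbour differences by a single edge-scatter
-- pass into a per-vertex sensitivity table followed by a filtered max pass (objective:
-- alternative decomposition, similar cost).

-- ===== PORT A =====
def sensitivity_on_0 (tt : List Int) (N : Int) : Int :=
  let n : Nat := 2 ^ N.toNat
  (List.range n).foldl (fun max_s x =>
    if tt.getD x 0 = 1 then max_s
    else
      let s : Int := (List.range N.toNat).foldl (fun s bit =>
        if tt.getD (x ^^^ (1 <<< bit)) 0 ≠ tt.getD x 0 then s + 1 else s) 0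
      max max_s s) 0

-- ===== PORT B =====
-- sens[i] += 1 (in-range in every use; List.set is the in-place update)
def pvAddAt (l : List Int) (i : Nat) : List Int := l.set i (l.getD i 0 + 1)

def sensitivity_on_0_alt (tt : List Int) (N : Int) : Int :=
  let n : Nat := 2 ^ N.toNat
  let sens : List Int := (List.range n).foldl (fun sens x =>
    (List.range N.toNat).foldl (fun sens bit =>
      let y := x ^^^ (1 <<< bit)
      if x < y ∧ tt.getD x 0 ≠ tt.getD y 0 then pvAddAt (pvAddAt sens x) y else sens)
      sens) (List.replicate n 0)
  (List.range n).foldl (fun best x =>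
    if tt.getD x 0 ≠ 1 then max best (sens.getD x 0) else best) 0

-- ===== PRECONDITION & SPEC =====
-- Pre_ excludes exactly the inputs where Python A raises: N < 0 (2**N is a float, range
-- raises TypeError) and truth tables shorter than 2^N (tt[x] raises IndexError).
def Pre_sensitivity_on_0 (tt : List Int) (N : Int) : Prop :=
  0 ≤ N ∧ 2 ^ N.toNat ≤ tt.length
instance (tt : List Int) (N : Int) : Decidable (Pre_sensitivity_on_0 tt N) := by
  unfold Pre_sensitivity_on_0; infer_instance
def pvWitness_sensitivity_on_0 : List Int × Int := ([0, 1, 1, 0], 2)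
def Spec_sensitivity_on_0 (tt : List Int) (N : Int) (out : Int) : Prop := out = sensitivity_on_0_alt tt N
instance (tt : List Int) (N : Int) (out : Int) : Decidable (Spec_sensitivity_on_0 tt N out) := by unfold Spec_sensitivity_on_0; infer_instance

-- ===== CLAIM (what is proved, stated in full; the proofs are below) =====
def Claim_equal_sensitivity_on_0 : Prop := ∀ (tt : List Int) (N : Int), Dom_sensitivity_on_0 tt N → Pre_sensitivity_on_0 tt N → Spec_sensitivity_on_0 tt N (sensitivity_on_0 tt N)

-- ===== LEMMAS AND PROOFS =====

-- tt[x ^ (1<<b)] differs from tt[x]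
def pvDiff (tt : List Int) (x b : Nat) : Bool := decide (tt.getD (x ^^^ (1 <<< b)) 0 ≠ tt.getD x 0)
-- B's edge guard, seen from vertex x along bit b
def pvGuard (tt : List Int) (x b : Nat) : Bool := decide (x < x ^^^ (1 <<< b)) && pvDiff tt x b
-- number of scatter hits vertex v receives while B processes vertex x
def pvHit (tt : List Int) (M x v : Nat) : Nat :=
  (List.range M).countP (fun b => pvGuard tt x b && (x == v || x ^^^ (1 <<< b) == v))
-- the sensitivity of vertex v (what A's inner loop counts)
def pvCnt (tt : List Int) (M v : Nat) : Nat := (List.range M).countP (pvDiff tt v)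

lemma pvDiff_symm (tt : List Int) (x b : Nat) :
    pvDiff tt (x ^^^ (1 <<< b)) b = pvDiff tt x b := by
  simp [pvDiff, Nat.xor_xor_cancel_right, ne_comm]

lemma length_pvAddAt (l : List Int) (i : Nat) : (pvAddAt l i).length = l.length := by
  simp [pvAddAt]

lemma getD_pvAddAt (l : List Int) (i v : Nat) (hi : i < l.length) :
    (pvAddAt l i).getD v 0 = l.getD v 0 + (if v = i then 1 else 0) := by
  rcases eq_or_ne v i with rfl | h
  · simp [pvAddAt, List.getD, hi]
  · simp [pvAddAt, List.getD, Ne.symm h, h]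

-- the inner (bit) scatter loop preserves the table length
lemma inner_len (tt : List Int) (x : Nat) (bs : List Nat) : ∀ s : List Int,
    (bs.foldl (fun sens bit =>
      let y := x ^^^ (1 <<< bit)
      if x < y ∧ tt.getD x 0 ≠ tt.getD y 0 then pvAddAt (pvAddAt sens x) y else sens)
      s).length = s.length := by
  induction bs with
  | nil => intro s; rfl
  | cons b bs ih =>
      intro s
      simp only [List.foldl_cons]
      rw [ih]
      split
      · simp [length_pvAddAt]
      · rfl

-- pointwise effect of the inner (bit) scatter loop
lemma inner_getD (tt : List Int) (x : Nat) (bs : List Nat) : ∀ (s : List Int) (v : Nat),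
    v < s.length → x < s.length → (∀ b ∈ bs, x ^^^ (1 <<< b) < s.length) →
    (bs.foldl (fun sens bit =>
      let y := x ^^^ (1 <<< bit)
      if x < y ∧ tt.getD x 0 ≠ tt.getD y 0 then pvAddAt (pvAddAt sens x) y else sens)
      s).getD v 0
    = s.getD v 0 + (bs.countP (fun b => pvGuard tt x b && (x == v || x ^^^ (1 <<< b) == v)) : Int) := by
  induction bs with
  | nil => intro s v _ _ _; simp
  | cons b bs ih =>
      intro s v hv hx hy
      simp only [List.foldl_cons, List.countP_cons]
      by_cases hg : x < x ^^^ (1 <<< b) ∧ tt.getD x 0 ≠ tt.getD (x ^^^ (1 <<< b)) 0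
      · have hyb : x ^^^ (1 <<< b) < s.length := hy b (List.mem_cons_self ..)
        have hne : x ≠ x ^^^ (1 <<< b) := Nat.ne_of_lt hg.1
        rw [if_pos hg]
        rw [ih _ v (by simp [length_pvAddAt, hv]) (by simp [length_pvAddAt, hx])
          (fun b' hb' => by simp [length_pvAddAt, hy b' (List.mem_cons_of_mem _ hb')])]
        rw [getD_pvAddAt _ _ _ (by simp [length_pvAddAt, hyb]),
          getD_pvAddAt _ _ _ hx]
        have hgb : pvGuard tt x b = true := by
          simp only [pvGuard, pvDiff, Bool.and_eq_true, decide_eq_true_eq]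
          exact ⟨hg.1, fun h => hg.2 h.symm⟩
        by_cases hxv : v = x
        · have hvy : ¬ v = x ^^^ (1 <<< b) := by rw [hxv]; exact hne
          have hf : (pvGuard tt x b && (x == v || x ^^^ (1 <<< b) == v)) = true := by
            rw [hgb]; simp [hxv.symm]
          rw [if_pos hxv, if_neg hvy]
          simp only [hf, if_true]
          push_cast; ring
        · by_cases hyv : v = x ^^^ (1 <<< b)
          · have hf : (pvGuard tt x b && (x == v || x ^^^ (1 <<< b) == v)) = true := by
              rw [hgb]; simp [hyv.symm]
            rw [if_neg hxv, if_pos hyv]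
            simp only [hf, if_true]
            push_cast; ring
          · have hf : (pvGuard tt x b && (x == v || x ^^^ (1 <<< b) == v)) = false := by
              simp only [Bool.and_eq_false_iff, Bool.or_eq_false_iff, beq_eq_false_iff_ne, ne_eq]
              right; exact ⟨fun h => hxv h.symm, fun h => hyv h.symm⟩
            rw [if_neg hxv, if_neg hyv]
            simp [hf]
      · have hgb : pvGuard tt x b = false := by
          simp only [pvGuard, pvDiff, Bool.and_eq_false_iff, decide_eq_false_iff_not]
          by_cases h1 : x < x ^^^ (1 <<< b)
          · right; intro hd; exact hg ⟨h1, fun he => hd he.symm⟩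
          · left; exact h1
        rw [if_neg hg, hgb]
        simpa using ih s v hv hx (fun b' hb' => hy b' (List.mem_cons_of_mem _ hb'))

-- pointwise effect of the whole scatter phase
lemma outer_getD (tt : List Int) (M : Nat) (xs : List Nat) : ∀ (s : List Int) (v : Nat),
    v < s.length → (∀ x ∈ xs, x < s.length) →
    (∀ x ∈ xs, ∀ b < M, x ^^^ (1 <<< b) < s.length) →
    (xs.foldl (fun sens x =>
      (List.range M).foldl (fun sens bit =>
        let y := x ^^^ (1 <<< bit)
        if x < y ∧ tt.getD x 0 ≠ tt.getD y 0 then pvAddAt (pvAddAt sens x) y else sens)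
        sens) s).getD v 0
    = s.getD v 0 + ((xs.map (fun x => pvHit tt M x v)).sum : Int) := by
  induction xs with
  | nil => intro s v _ _ _; simp
  | cons x xs ih =>
      intro s v hv hx hy
      simp only [List.foldl_cons, List.map_cons, List.sum_cons]
      rw [ih _ v (by rw [inner_len]; exact hv)
        (fun x' hx' => by rw [inner_len]; exact hx x' (List.mem_cons_of_mem _ hx'))
        (fun x' hx' b hb => by rw [inner_len]; exact hy x' (List.mem_cons_of_mem _ hx') b hb)]
      rw [inner_getD tt x _ s v hv (hx x (List.mem_cons_self ..))
        (fun b hb => hy x (List.mem_cons_self ..) b (List.mem_range.1 hb))]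
      have : pvHit tt M x v =
          (List.range M).countP (fun b => pvGuard tt x b && (x == v || x ^^^ (1 <<< b) == v)) := rfl
      rw [this]; push_cast; ring

lemma countP_range_eq_sum (p : Nat → Bool) (n : Nat) :
    (List.range n).countP p = ∑ b ∈ Finset.range n, if p b then 1 else 0 := by
  induction n with
  | zero => simp
  | succ n ih =>
      rw [List.range_succ, List.countP_append, ih, Finset.sum_range_succ]
      simp [List.countP_cons]

lemma sum_map_range (f : Nat → Nat) (n : Nat) :
    ((List.range n).map f).sum = ∑ x ∈ Finset.range n, f x := by
  induction n with
  | zero => simp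
  | succ n ih => simp [List.range_succ, Finset.sum_range_succ, ih]

-- each hypercube edge at v is scattered exactly once: total hits at v = sensitivity of v
lemma sum_pvHit (tt : List Int) (M v : Nat) (hv : v < 2 ^ M) :
    ((List.range (2 ^ M)).map (fun x => pvHit tt M x v)).sum = pvCnt tt M v := by
  rw [sum_map_range, pvCnt, countP_range_eq_sum]
  have key : ∀ x, pvHit tt M x v = ∑ b ∈ Finset.range M,
      if pvGuard tt x b && (x == v || x ^^^ (1 <<< b) == v) then 1 else 0 := by
    intro x; rw [pvHit, countP_range_eq_sum]
  simp only [key]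
  rw [Finset.sum_comm]
  refine Finset.sum_congr rfl ?_
  intro b hb
  have hbM : b < M := Finset.mem_range.1 hb
  set y := v ^^^ (1 <<< b) with hy
  have hyn : y < 2 ^ M := by
    refine Nat.xor_lt_two_pow hv ?_
    rw [Nat.one_shiftLeft]
    exact Nat.pow_lt_pow_right (by norm_num) hbM
  have hyv : y ≠ v := by
    intro h
    have h2 := congrArg (fun z => v ^^^ z) h
    simp only [hy, ← Nat.xor_assoc, Nat.xor_self, Nat.zero_xor] at h2
    have := Nat.two_pow_pos b
    rw [Nat.one_shiftLeft] at h2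
    omega
  -- the summand is nonzero only at x = v and at x = y
  have point : ∀ x, (if pvGuard tt x b && (x == v || x ^^^ (1 <<< b) == v) then 1 else 0)
      = (if x = v then (if pvGuard tt v b then 1 else 0) else 0)
        + (if x = y then (if pvGuard tt y b then 1 else 0) else 0) := by
    intro x
    by_cases hxv : x = v
    · subst hxv
      simp [Ne.symm hyv]
    · by_cases hxy : x = y
      · subst hxy
        have hxv2 : y ^^^ (1 <<< b) = v := by simp [hy, Nat.xor_xor_cancel_right]
        simp [hxv, hxv2]
      · have h1 : (x == v) = false := by simp [hxv]
        have h2 : (x ^^^ (1 <<< b) == v) = false := by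
          simp only [beq_eq_false_iff_ne, ne_eq]
          intro h
          exact hxy (by simpa [Nat.xor_xor_cancel_right] using congrArg (· ^^^ (1 <<< b)) h)
        simp [h1, h2, hxv, hxy]
  simp only [point]
  rw [Finset.sum_add_distrib, Finset.sum_ite_eq' (Finset.range (2 ^ M)) v,
    Finset.sum_ite_eq' (Finset.range (2 ^ M)) y]
  rw [if_pos (Finset.mem_range.2 hv), if_pos (Finset.mem_range.2 hyn)]
  have hgv : pvGuard tt v b = (decide (v < y) && pvDiff tt v b) := rfl
  have hgy : pvGuard tt y b = (decide (y < v) && pvDiff tt v b) := by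
    have h1 : y ^^^ (1 <<< b) = v := by simp [hy, Nat.xor_xor_cancel_right]
    simp [pvGuard, pvDiff_symm tt v b, hy]
  rw [hgv, hgy]
  rcases Nat.lt_or_ge v y with h | h
  · simp [h, Nat.not_lt.2 (Nat.le_of_lt h)]
  · have h' : y < v := Nat.lt_of_le_of_ne h hyv
    simp [h', Nat.not_lt.2 h]

-- A's inner loop counts pvDiff
lemma A_inner (tt : List Int) (x : Nat) (bs : List Nat) : ∀ s : Int,
    bs.foldl (fun s bit =>
      if tt.getD (x ^^^ (1 <<< bit)) 0 ≠ tt.getD x 0 then s + 1 else s) s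
    = s + (bs.countP (pvDiff tt x) : Int) := by
  induction bs with
  | nil => intro s; simp
  | cons b bs ih =>
      intro s
      simp only [List.foldl_cons, List.countP_cons]
      by_cases h : tt.getD (x ^^^ (1 <<< b)) 0 ≠ tt.getD x 0
      · rw [if_pos h, ih]
        have hd : pvDiff tt x b = true := by simpa [pvDiff] using h
        simp [hd]; push_cast; ring
      · rw [if_neg h, ih]
        have hd : pvDiff tt x b = false := by simpa [pvDiff] using h
        simp [hd]

-- the two final passes agree once sens.getD v 0 = pvCnt v on the visited vertices
lemma final_pass (tt : List Int) (M : Nat) (sens : List Int) (xs : List Nat)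
    (hsens : ∀ x ∈ xs, sens.getD x 0 = (pvCnt tt M x : Int)) : ∀ m : Int,
    xs.foldl (fun max_s x =>
      if tt.getD x 0 = 1 then max_s
      else
        let s : Int := (List.range M).foldl (fun s bit =>
          if tt.getD (x ^^^ (1 <<< bit)) 0 ≠ tt.getD x 0 then s + 1 else s) 0
        max max_s s) m
    = xs.foldl (fun best x =>
      if tt.getD x 0 ≠ 1 then max best (sens.getD x 0) else best) m := by
  induction xs with
  | nil => intro m; rfl
  | cons x xs ih =>
      intro m
      simp only [List.foldl_cons]
      have hx := hsens x (List.mem_cons_self ..)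
      have ih' := ih (fun x' hx' => hsens x' (List.mem_cons_of_mem _ hx'))
      by_cases h : tt.getD x 0 = 1
      · rw [if_pos h, if_neg (by simpa using h), ih']
      · rw [if_neg h, if_pos h, ih', A_inner, hx]
        simp [pvCnt]

-- ===== VERDICT (by name: the statement is the Claim_ definition above) =====
theorem sensitivity_on_0_spec : Claim_equal_sensitivity_on_0 := by
  intro tt N _ _
  show sensitivity_on_0 tt N = sensitivity_on_0_alt tt N
  unfold sensitivity_on_0 sensitivity_on_0_alt
  set M := N.toNat
  set n := 2 ^ M with hn
  set sens := (List.range n).foldl (fun sens x =>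
    (List.range M).foldl (fun sens bit =>
      let y := x ^^^ (1 <<< bit)
      if x < y ∧ tt.getD x 0 ≠ tt.getD y 0 then pvAddAt (pvAddAt sens x) y else sens)
      sens) (List.replicate n 0) with hsens
  refine final_pass tt M sens (List.range n) ?_ 0
  intro v hv
  have hvn : v < n := List.mem_range.1 hv
  have hlen : ∀ x, x < n → ∀ b, b < M → x ^^^ (1 <<< b) < n := by
    intro x hx b hb
    refine Nat.xor_lt_two_pow hx ?_
    rw [Nat.one_shiftLeft]
    exact Nat.pow_lt_pow_right (by norm_num) hb
  rw [hsens, outer_getD tt M (List.range n) (List.replicate n 0) v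
    (by simpa using hvn) (fun x hx => by simpa using List.mem_range.1 hx)
    (fun x hx b hb => by simpa using hlen x (List.mem_range.1 hx) b hb)]
  rw [sum_pvHit tt M v hvn]
  simp
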